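-- pv_equiv track=rewrite | github.com/j-pillow/PythonAnalyser | utilFuncs.py | splitShower
-- ===== SOURCE A (Python) =====
-- def splitShower( binnedPoints ):
--     """Function that finds finds the number, and length, of the 'sections' of a
--     binned shower"""
--
--     emptyBin = [ (1 if len(i) > 0 else 0) for i in binnedPoints ]
--
--     nBins = len(emptyBin)
--
--     sectionLengths = []
--     secLen = 0
--     for i in emptyBin:
--         if i == 1:
--             if secLen < 0:
--                 sectionLengths.append(secLen)
--                 secLen = 1
--             else:
--                 secLen += 1
--         else:
--             if secLen > 0:
--                 sectionLengths.append(secLen)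
--                 secLen = -1
--             else:
--                 secLen -= 1
--     sectionLengths.append(secLen)
--
--     return sectionLengths
-- ===== SOURCE B (Python) =====
-- def _merge(left, right):
--     if (left[-1] > 0) == (right[0] > 0):
--         return left[:-1] + [left[-1] + right[0]] + right[1:]
--     return left + right
--
--
-- def _solve(bp):
--     if len(bp) == 1:
--         return [1] if bp[0] else [-1]
--     mid = len(bp) // 2
--     return _merge(_solve(bp[:mid]), _solve(bp[mid:]))
--
--
-- def splitShower(binnedPoints):
--     if not binnedPoints:
--         return [0]
--     return _solve(binnedPoints)
-- ===== Notes on version B (the rewrite author's own statement) =====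
-- stated objective: alternative
-- what changed: Replaced A's single-pass sign-flipping accumulator by a divide-and-conquer: split the bin list in half, recursively compute each half's signed run-lengths, and merge the two results at the junction (joining the boundary runs when their signs agree).
import Mathlib
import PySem

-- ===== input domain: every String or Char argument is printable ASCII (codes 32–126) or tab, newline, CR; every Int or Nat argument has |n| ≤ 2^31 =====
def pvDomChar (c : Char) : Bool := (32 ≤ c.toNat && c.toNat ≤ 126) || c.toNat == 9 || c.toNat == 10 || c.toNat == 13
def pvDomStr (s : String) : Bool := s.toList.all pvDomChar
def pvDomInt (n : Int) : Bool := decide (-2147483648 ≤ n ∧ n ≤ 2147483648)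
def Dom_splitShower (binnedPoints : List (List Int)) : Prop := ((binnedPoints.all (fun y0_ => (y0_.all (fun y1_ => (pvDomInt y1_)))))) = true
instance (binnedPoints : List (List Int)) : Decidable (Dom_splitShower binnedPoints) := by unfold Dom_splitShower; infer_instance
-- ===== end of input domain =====

-- B replaces A's single-pass sign-flipping accumulator by divide-and-conquer:
-- recursively solve both halves and merge the signed run-length lists at the junction; alternative, not faster.


-- ===== PORT A =====
-- one loop step of A: state = (sectionLengths, secLen), input = one indicator value
def stepA (st : List Int × Int) (i : Int) : List Int × Int :=
  if i = 1 then
    if st.2 < 0 then (st.1 ++ [st.2], 1) else (st.1, st.2 + 1)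
  else
    if st.2 > 0 then (st.1 ++ [st.2], -1) else (st.1, st.2 - 1)

def splitShower (binnedPoints : List (List Int)) : List Int :=
  let emptyBin := binnedPoints.map (fun i => if i.length > 0 then (1 : Int) else 0)
  let st := emptyBin.foldl stepA ([], 0)
  st.1 ++ [st.2]

-- ===== PORT B =====
-- _merge: join two signed run-length lists, fusing the boundary runs when signs agree
def mergeB (left right : List Int) : List Int :=
  if (decide (0 < PySem.List.pyGetD left (-1) 0)) = (decide (0 < PySem.List.pyGetD right 0 0)) then
    PySem.List.slice left none (some (-1))
      ++ [PySem.List.pyGetD left (-1) 0 + PySem.List.pyGetD right 0 0]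
      ++ PySem.List.slice right (some 1) none
  else left ++ right

-- _solve: divide and conquer on the bin list ('bp.length ≤ 1' second branch = totality guard
-- for the empty list, unreachable from splitShower_alt's recursion)
def solveB (bp : List (List Int)) : List Int :=
  if h1 : bp.length = 1 then
    if (PySem.List.pyGetD bp 0 []).length > 0 then [1] else [-1]
  else if _h2 : bp.length ≤ 1 then []
  else
    mergeB (solveB (PySem.List.slice bp none (some (PySem.Int.floordiv (bp.length : Int) 2))))
           (solveB (PySem.List.slice bp (some (PySem.Int.floordiv (bp.length : Int) 2)) none))
termination_by bp.length
decreasing_by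
  · have h : PySem.Int.floordiv ((bp.length : Nat) : Int) 2 = ((bp.length / 2 : Nat) : Int) := by
      exact_mod_cast PySem.Int.floordiv_natCast bp.length 2
    rw [h, PySem.List.slice_to_natCast]
    simp only [List.length_take]
    omega
  · have h : PySem.Int.floordiv ((bp.length : Nat) : Int) 2 = ((bp.length / 2 : Nat) : Int) := by
      exact_mod_cast PySem.Int.floordiv_natCast bp.length 2
    rw [h, PySem.List.slice_from_natCast]
    simp only [List.length_drop]
    omega

def splitShower_alt (binnedPoints : List (List Int)) : List Int :=
  if binnedPoints = [] then [0] else solveB binnedPoints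

-- ===== PRECONDITION & SPEC =====
def Spec_splitShower (binnedPoints : List (List Int)) (out : List Int) : Prop := out = splitShower_alt binnedPoints
instance (binnedPoints : List (List Int)) (out : List Int) : Decidable (Spec_splitShower binnedPoints out) := by unfold Spec_splitShower; infer_instance

-- ===== CLAIM (what is proved, stated in full; the proofs are below) =====
def Claim_equal_splitShower : Prop := ∀ (binnedPoints : List (List Int)), Dom_splitShower binnedPoints → Spec_splitShower binnedPoints (splitShower binnedPoints)

-- ===== LEMMAS AND PROOFS =====

-- A's loop over booleans (i = 1 ↔ true), for the induction
def loopA (acc : List Int) (s : Int) : List Bool → List Int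
  | [] => acc ++ [s]
  | b :: t =>
    if b then
      if s < 0 then loopA (acc ++ [s]) 1 t else loopA acc (s + 1) t
    else
      if s > 0 then loopA (acc ++ [s]) (-1) t else loopA acc (s - 1) t

-- run-length encoding of a boolean list, built back-to-front
def runsB : List Bool → List (Bool × Int)
  | [] => []
  | b :: t =>
    match runsB t with
    | (k, n) :: rest => if k = b then (b, n + 1) :: rest else (b, 1) :: (k, n) :: rest
    | [] => [(b, 1)]

def sig (rs : List (Bool × Int)) : List Int := rs.map (fun p => if p.1 then p.2 else -p.2)

-- prepend a run (k, n) onto a run list, merging with an equal-keyed head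
def addRun (k : Bool) (n : Int) : List (Bool × Int) → List (Bool × Int)
  | (k', n') :: rest => if k' = k then (k, n + n') :: rest else (k, n) :: (k', n') :: rest
  | [] => [(k, n)]

-- fold a run list into another via addRun (junction merge of run lists)
def foldRuns (rs base : List (Bool × Int)) : List (Bool × Int) :=
  rs.foldr (fun p acc => addRun p.1 p.2 acc) base

-- well-formed run lists: positive lengths, adjacent keys distinct
def goodRuns : List (Bool × Int) → Prop
  | [] => True
  | [(_, n)] => 0 < n
  | (k, n) :: (k', n') :: rest => 0 < n ∧ k ≠ k' ∧ goodRuns ((k', n') :: rest)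

theorem goodRuns_head_pos (k : Bool) (n : Int) (t : List (Bool × Int))
    (h : goodRuns ((k, n) :: t)) : 0 < n := by
  cases t with
  | nil => exact h
  | cons q r => obtain ⟨q1, q2⟩ := q; exact h.1

theorem runsB_cons (b : Bool) (t : List Bool) : runsB (b :: t) = addRun b 1 (runsB t) := by
  simp only [runsB]
  cases h : runsB t with
  | nil => simp [addRun]
  | cons p rest =>
    obtain ⟨k, n⟩ := p
    by_cases hk : k = b <;> simp [addRun, hk, add_comm]

theorem addRun_addRun (k : Bool) (n m : Int) (l : List (Bool × Int)) :
    addRun k n (addRun k m l) = addRun k (n + m) l := by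
  cases l with
  | nil => simp [addRun]
  | cons p rest =>
    obtain ⟨k', n'⟩ := p
    by_cases hk : k' = k <;> simp [addRun, hk, add_assoc]

theorem addRun_shape (k : Bool) (n : Int) (l : List (Bool × Int)) :
    ∃ m t, addRun k n l = (k, m) :: t := by
  cases l with
  | nil => exact ⟨n, [], rfl⟩
  | cons p rest =>
    obtain ⟨k', n'⟩ := p
    by_cases hk : k' = k
    · exact ⟨n + n', rest, by simp [addRun, hk]⟩
    · exact ⟨n, (k', n') :: rest, by simp [addRun, hk]⟩

theorem addRun_ne_head (k k' : Bool) (n n' : Int) (t : List (Bool × Int)) (hne : k' ≠ k) :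
    addRun k n ((k', n') :: t) = (k, n) :: (k', n') :: t := by
  simp [addRun, hne]

theorem addRun_ne (k b : Bool) (n m : Int) (l : List (Bool × Int)) (hne : b ≠ k) :
    addRun k n (addRun b m l) = (k, n) :: addRun b m l := by
  cases l with
  | nil => simp [addRun, hne]
  | cons p rest =>
    obtain ⟨k', n'⟩ := p
    by_cases hk : k' = b <;> simp [addRun, hk, hne]

theorem foldRuns_cons (k : Bool) (n : Int) (rs base : List (Bool × Int)) :
    foldRuns ((k, n) :: rs) base = addRun k n (foldRuns rs base) := rfl

theorem foldRuns_addRun (k : Bool) (n : Int) (rs base : List (Bool × Int)) :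
    foldRuns (addRun k n rs) base = addRun k n (foldRuns rs base) := by
  cases rs with
  | nil => rfl
  | cons p rest =>
    obtain ⟨k', n'⟩ := p
    by_cases hk : k' = k
    · rw [show addRun k n ((k', n') :: rest) = (k, n + n') :: rest from by simp [addRun, hk],
        foldRuns_cons, foldRuns_cons, hk, addRun_addRun]
    · rw [show addRun k n ((k', n') :: rest) = (k, n) :: (k', n') :: rest from by
          simp [addRun, hk],
        foldRuns_cons, foldRuns_cons]

theorem runsB_append (xs ys : List Bool) :
    runsB (xs ++ ys) = foldRuns (runsB xs) (runsB ys) := by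
  induction xs with
  | nil => simp [runsB, foldRuns]
  | cons b t ih =>
    rw [List.cons_append, runsB_cons, ih, runsB_cons, foldRuns_addRun]

theorem goodRuns_addRun (k : Bool) (rs : List (Bool × Int)) (h : goodRuns rs) :
    goodRuns (addRun k 1 rs) := by
  cases rs with
  | nil => simp [addRun, goodRuns]
  | cons p rest =>
    obtain ⟨k', n'⟩ := p
    have hk'pos : (0:Int) < n' := goodRuns_head_pos _ _ _ h
    by_cases hk : k' = k
    · rw [show addRun k 1 ((k', n') :: rest) = (k, 1 + n') :: rest from by simp [addRun, hk]]
      cases rest with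
      | nil => show (0:Int) < 1 + n'; omega
      | cons q r =>
        obtain ⟨q1, q2⟩ := q
        exact ⟨by omega, by rw [← hk]; exact h.2.1, h.2.2⟩
    · rw [show addRun k 1 ((k', n') :: rest) = (k, 1) :: (k', n') :: rest from by
          simp [addRun, hk]]
      exact ⟨by omega, fun he => hk he.symm, h⟩

theorem goodRuns_runsB (xs : List Bool) : goodRuns (runsB xs) := by
  induction xs with
  | nil => simp [runsB, goodRuns]
  | cons b t ih => rw [runsB_cons]; exact goodRuns_addRun b _ ih

theorem runsB_ne_nil (xs : List Bool) (h : xs ≠ []) : runsB xs ≠ [] := by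
  obtain ⟨b, t, rfl⟩ := List.exists_cons_of_ne_nil h
  rw [runsB_cons]
  obtain ⟨m, u, he⟩ := addRun_shape b 1 (runsB t)
  simp [he]

-- evaluating mergeB on nonempty concrete lists
theorem mergeB_eval (x : Int) (l : List Int) (y : Int) (r : List Int) :
    mergeB (l ++ [x]) (y :: r) =
      if (decide (0 < x)) = (decide (0 < y)) then l ++ [x + y] ++ r
      else (l ++ [x]) ++ (y :: r) := by
  unfold mergeB
  rw [PySem.List.pyGetD_neg_one_append_singleton, PySem.List.pyGetD_zero_cons,
    PySem.List.slice_to_neg_one, PySem.List.slice_from_one]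
  simp

theorem mergeB_cons (x : Int) (l r : List Int) (hl : l ≠ []) :
    mergeB (x :: l) r = x :: mergeB l r := by
  obtain rfl | ⟨l', z, rfl⟩ := List.eq_nil_or_concat l
  · exact absurd rfl hl
  simp only [List.concat_eq_append] at hl ⊢
  unfold mergeB
  rw [show x :: (l' ++ [z]) = (x :: l') ++ [z] by simp,
    PySem.List.pyGetD_neg_one_append_singleton, PySem.List.pyGetD_neg_one_append_singleton,
    PySem.List.slice_to_neg_one, PySem.List.slice_to_neg_one]
  split_ifs
  · rw [List.dropLast_concat, List.dropLast_concat]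
    simp
  · simp

theorem mergeB_sig (r1 r2 : List (Bool × Int)) (h1 : goodRuns r1) (h2 : goodRuns r2)
    (hn1 : r1 ≠ []) (hn2 : r2 ≠ []) :
    mergeB (sig r1) (sig r2) = sig (foldRuns r1 r2) := by
  induction r1 with
  | nil => exact absurd rfl hn1
  | cons p rest ih =>
    obtain ⟨k, n⟩ := p
    have hkpos : (0:Int) < n := goodRuns_head_pos _ _ _ h1
    cases rest with
    | nil =>
      -- single run [(k, n)] merged into r2
      obtain ⟨q, r2', rfl⟩ := List.exists_cons_of_ne_nil hn2
      obtain ⟨k', m⟩ := q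
      have hmpos : (0:Int) < m := goodRuns_head_pos _ _ _ h2
      have hfold : foldRuns [(k, n)] ((k', m) :: r2') = addRun k n ((k', m) :: r2') := by
        simp [foldRuns]
      rw [hfold]
      have hsig1 : sig [(k, n)] = [] ++ [if k then n else -n] := by simp [sig]
      have hsig2 : sig ((k', m) :: r2') = (if k' then m else -m) :: sig r2' := by simp [sig]
      rw [hsig1, hsig2, mergeB_eval]
      have hsgn1 : decide (0 < if k then n else -n) = k := by
        cases k <;> simp <;> omega
      have hsgn2 : decide (0 < if k' then m else -m) = k' := by
        cases k' <;> simp <;> omega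
      rw [hsgn1, hsgn2]
      by_cases hkk : k = k'
      · subst hkk
        rw [if_pos rfl]
        simp only [addRun, sig]
        cases k <;> simp <;> ring
      · rw [if_neg hkk, addRun_ne_head k k' n m r2' (fun h => hkk h.symm)]
        simp [sig]
    | cons q rest' =>
      obtain ⟨k2, n2⟩ := q
      have hne : k ≠ k2 := h1.2.1
      have hgood' : goodRuns ((k2, n2) :: rest') := h1.2.2
      have hsig : sig ((k, n) :: (k2, n2) :: rest')
          = (if k then n else -n) :: sig ((k2, n2) :: rest') := by simp [sig]
      rw [hsig, mergeB_cons _ _ _ (by simp [sig]),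
        ih hgood' (by simp)]
      have hfold : foldRuns ((k, n) :: (k2, n2) :: rest') r2
          = addRun k n (foldRuns ((k2, n2) :: rest') r2) := by
        simp [foldRuns]
      rw [hfold]
      obtain ⟨m, t, hshape⟩ := addRun_shape k2 n2 (foldRuns rest' r2)
      have hfold2 : foldRuns ((k2, n2) :: rest') r2 = (k2, m) :: t := by
        simpa [foldRuns] using hshape
      rw [hfold2, addRun_ne_head k k2 n m t (fun h => hne h.symm)]
      simp [sig]

-- B's divide and conquer computes sig ∘ runsB of the indicator list
theorem solve_correct_aux : ∀ (n : Nat) (bp : List (List Int)), bp.length = n → bp ≠ [] →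
    solveB bp = sig (runsB (bp.map (fun i => decide (i.length > 0)))) := by
  intro n
  induction n using Nat.strong_induction_on with
  | _ n ih =>
    intro bp hlen hne
    rw [solveB]
    by_cases h1 : bp.length = 1
    · obtain ⟨x, t, rfl⟩ := List.exists_cons_of_ne_nil hne
      have ht : t = [] := by simpa using h1
      subst ht
      rw [dif_pos h1, PySem.List.pyGetD_zero_cons]
      by_cases hx : x.length > 0 <;> simp [hx, runsB, sig]
    · have hlen2 : 2 ≤ bp.length := by
        cases bp with
        | nil => exact absurd rfl hne
        | cons x t =>
          cases t with
          | nil => exact absurd rfl h1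
          | cons y u => simp
      rw [dif_neg h1, dif_neg (by omega)]
      have hmid : PySem.Int.floordiv ((bp.length : Nat) : Int) 2 = ((bp.length / 2 : Nat) : Int) := by
        exact_mod_cast PySem.Int.floordiv_natCast bp.length 2
      rw [hmid, PySem.List.slice_to_natCast, PySem.List.slice_from_natCast]
      have hk1 : 1 ≤ bp.length / 2 := by omega
      have hk2 : bp.length / 2 < bp.length := by omega
      have htake : (bp.take (bp.length / 2)).length = bp.length / 2 := by
        rw [List.length_take]; omega
      have hdrop : (bp.drop (bp.length / 2)).length = bp.length - bp.length / 2 := by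
        simp
      rw [ih (bp.length / 2) (by omega) _ htake (by
            intro h; rw [h] at htake; simp at htake; omega),
          ih (bp.length - bp.length / 2) (by omega) _ hdrop (by
            intro h; rw [h] at hdrop; simp at hdrop; omega)]
      rw [mergeB_sig _ _ (goodRuns_runsB _) (goodRuns_runsB _)
            (runsB_ne_nil _ (by
              simp only [ne_eq, List.map_eq_nil_iff]
              intro h0; rw [h0] at htake; simp at htake; omega))
            (runsB_ne_nil _ (by
              simp only [ne_eq, List.map_eq_nil_iff]
              intro h0; rw [h0] at hdrop; simp at hdrop; omega)),
          ← runsB_append, ← List.map_append, List.take_append_drop]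

-- A's loop equals sig ∘ addRun-extended runsB
theorem loopA_cons_true (acc : List Int) (s : Int) (t : List Bool) :
    loopA acc s (true :: t)
      = if s < 0 then loopA (acc ++ [s]) 1 t else loopA acc (s + 1) t := by
  simp [loopA]

theorem loopA_cons_false (acc : List Int) (s : Int) (t : List Bool) :
    loopA acc s (false :: t)
      = if s > 0 then loopA (acc ++ [s]) (-1) t else loopA acc (s - 1) t := by
  simp [loopA]

theorem loopA_eq_sig (xs : List Bool) : ∀ (acc : List Int) (k : Bool) (n : Int), 0 < n →
    loopA acc (if k then n else -n) xs = acc ++ sig (addRun k n (runsB xs)) := by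
  induction xs with
  | nil =>
    intro acc k n hn
    cases k <;> simp [loopA, runsB, addRun, sig]
  | cons b t ih =>
    intro acc k n hn
    by_cases hbk : b = k
    · subst hbk
      have h1 : loopA acc (if b then n else -n) (b :: t)
          = loopA acc (if b then n + 1 else -(n + 1)) t := by
        cases b
        · rw [if_neg (by simp), if_neg (by simp), loopA_cons_false,
            if_neg (by omega)]
          congr 1; omega
        · rw [if_pos rfl, if_pos rfl, loopA_cons_true, if_neg (by omega)]
      rw [h1, ih acc b (n + 1) (by omega), runsB_cons, addRun_addRun]
    · have h1 : loopA acc (if k then n else -n) (b :: t)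
          = loopA (acc ++ [if k then n else -n]) (if b then 1 else -1) t := by
        cases b
        · have hk : k = true := by revert hbk; cases k <;> simp
          subst hk
          rw [if_pos rfl, loopA_cons_false, if_pos (by omega)]
          norm_num
        · have hk : k = false := by revert hbk; cases k <;> simp
          subst hk
          rw [if_neg (by simp), loopA_cons_true, if_pos (by omega)]
          norm_num
      rw [h1, ih (acc ++ [if k then n else -n]) b 1 (by omega), runsB_cons,
        addRun_ne k b n 1 (runsB t) hbk]
      simp [sig]

theorem foldl_stepA_loopA (bp : List (List Int)) : ∀ (acc : List Int) (s : Int),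
    ((bp.map (fun i => if i.length > 0 then (1 : Int) else 0)).foldl stepA (acc, s)).1
      ++ [((bp.map (fun i => if i.length > 0 then (1 : Int) else 0)).foldl stepA (acc, s)).2]
      = loopA acc s (bp.map (fun i => decide (i.length > 0))) := by
  induction bp with
  | nil => intro acc s; simp [loopA]
  | cons x t ih =>
    intro acc s
    rw [List.map_cons, List.map_cons, List.foldl_cons]
    by_cases hx : x.length > 0
    · rw [if_pos hx, show decide (x.length > 0) = true by simp [hx],
        show stepA (acc, s) 1 = if s < 0 then (acc ++ [s], 1) else (acc, s + 1) by
          simp [stepA],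
        loopA_cons_true]
      by_cases hs : s < 0
      · rw [if_pos hs, if_pos hs, ih]
      · rw [if_neg hs, if_neg hs, ih]
    · rw [if_neg hx, show decide (x.length > 0) = false by simp [hx],
        show stepA (acc, s) 0 = if s > 0 then (acc ++ [s], -1) else (acc, s - 1) by
          simp [stepA],
        loopA_cons_false]
      by_cases hs : s > 0
      · rw [if_pos hs, if_pos hs, ih]
      · rw [if_neg hs, if_neg hs, ih]

theorem splitShower_eq_sig (bp : List (List Int)) (hne : bp ≠ []) :
    splitShower bp = sig (runsB (bp.map (fun i => decide (i.length > 0)))) := by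
  unfold splitShower
  show _ ++ _ = _
  rw [foldl_stepA_loopA bp [] 0]
  obtain ⟨x, t, rfl⟩ := List.exists_cons_of_ne_nil hne
  rw [List.map_cons]
  have h1 : loopA [] 0 (decide (x.length > 0) :: t.map (fun i => decide (i.length > 0)))
      = loopA [] (if decide (x.length > 0) then 1 else -1)
          (t.map (fun i => decide (i.length > 0))) := by
    by_cases hx : x.length > 0
    · rw [show decide (x.length > 0) = true by simp [hx], loopA_cons_true,
        if_neg (by omega), if_pos rfl]
      norm_num
    · rw [show decide (x.length > 0) = false by simp [hx], loopA_cons_false,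
        if_neg (by omega), if_neg (by simp)]
      norm_num
  rw [h1, loopA_eq_sig _ [] _ 1 (by omega), ← runsB_cons]
  simp

-- ===== VERDICT (by name: the statement is the Claim_ definition above) =====
theorem splitShower_spec : Claim_equal_splitShower := by
  intro bp _
  unfold Spec_splitShower splitShower_alt
  by_cases hbp : bp = []
  · subst hbp; decide
  · rw [if_neg hbp, splitShower_eq_sig bp hbp, solve_correct_aux bp.length bp rfl hbp]
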